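-- pv_equiv track=rewrite | github.com/bourbonAW/build-my-agent | src/bourbon/repl.py | _split_stable_markdown
-- ===== SOURCE A (Python) =====
-- def _split_stable_markdown(buffer: str) -> tuple[str, str]:
--     """Split accumulated text into a committed markdown prefix and pending tail.
--
--     Commit only complete markdown blocks so multi-line structures such as
--     headings, lists, tables, and fenced code blocks stay together.
--     """
--     if not buffer:
--         return "", ""
--
--     fence_count = 0
--     last_block_boundary = 0
--     offset = 0
--
--     for line in buffer.splitlines(keepends=True):
--         if line.lstrip().startswith("```"):
--             fence_count += 1
--
--         if fence_count % 2 == 0 and line == "\n":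
--             last_block_boundary = offset + len(line)
--
--         offset += len(line)
--
--     if last_block_boundary > 0:
--         return buffer[:last_block_boundary], buffer[last_block_boundary:]
--
--     if "\n" not in buffer:
--         return "", buffer
--
--     if buffer.endswith("\n") and fence_count % 2 == 0:
--         return "", buffer
--
--     last_newline = buffer.rfind("\n")
--     return buffer[: last_newline + 1], buffer[last_newline + 1 :]
-- ===== SOURCE B (Python) =====
-- def _split_stable_markdown(buffer: str) -> tuple[str, str]:
--     if not buffer:
--         return "", ""
--
--     lines = buffer.splitlines(keepends=True)
--     fences = [line.lstrip().startswith("```") for line in lines]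
--     total = sum(fences)
--
--     # Reverse scan with early exit: find the end offset of the last blank
--     # line that lies outside any fenced code block.
--     boundary = 0
--     seen = 0
--     offset = len(buffer)
--     for line, fence in zip(reversed(lines), reversed(fences)):
--         seen += fence
--         if line == "\n" and (total - seen) % 2 == 0:
--             boundary = offset
--             break
--         offset -= len(line)
--
--     if boundary:
--         cut = boundary
--     elif "\n" not in buffer:
--         cut = 0
--     elif buffer.endswith("\n") and total % 2 == 0:
--         cut = 0
--     else:
--         cut = buffer.rfind("\n") + 1
--     return buffer[:cut], buffer[cut:]
-- ===== Notes on version B (the rewrite author's own statement) =====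
-- stated objective: alternative
-- what changed: Replaces A's single forward fold (running fence parity + boundary overwrite across every line) by two passes: precompute per-line fence flags and their total, then a reverse scan with early exit that stops at the last blank line outside a fence, and a single cut-point slice instead of A's four return branches.
import Mathlib
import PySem

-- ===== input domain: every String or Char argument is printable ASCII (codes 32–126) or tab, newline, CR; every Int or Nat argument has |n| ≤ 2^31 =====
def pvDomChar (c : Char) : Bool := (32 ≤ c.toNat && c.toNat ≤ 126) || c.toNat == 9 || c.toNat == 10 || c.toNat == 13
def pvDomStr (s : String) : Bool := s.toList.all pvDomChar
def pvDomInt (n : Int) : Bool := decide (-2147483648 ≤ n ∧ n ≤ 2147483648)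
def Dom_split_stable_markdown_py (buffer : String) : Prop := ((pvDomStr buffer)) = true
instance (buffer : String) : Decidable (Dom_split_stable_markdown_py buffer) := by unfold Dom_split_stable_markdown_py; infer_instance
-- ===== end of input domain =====

-- B replaces A's single forward scan by fence-flag precomputation plus a reverse scan with
-- early exit and one cut-point slice; same O(n) cost, different decomposition.

-- buffer.splitlines(keepends=True); exact on the Dom alphabet, where the only line breaks are \n, \r, \r\n
def pvSplitLinesKeep : List Char → List Char → List (List Char)
  | [], acc => if acc = [] then [] else [acc.reverse]
  | c :: rest, acc =>
    if c = '\n' then (acc.reverse ++ ['\n']) :: pvSplitLinesKeep rest []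
    else if c = '\r' then
      (if rest.head? = some '\n'
       then (acc.reverse ++ ['\r', '\n']) :: pvSplitLinesKeep rest.tail []
       else (acc.reverse ++ ['\r']) :: pvSplitLinesKeep rest [])
    else pvSplitLinesKeep rest (c :: acc)
  termination_by cs _ => cs.length

-- line.lstrip().startswith("```")
def pvFence (line : List Char) : Bool :=
  PySem.Chars.startswith (PySem.Chars.lstrip line) ['`', '`', '`']

-- ===== PORT A =====
-- the body of A's for-loop, state = (fence_count, last_block_boundary, offset)
def pvStepA (s : Nat × Nat × Nat) (line : List Char) : Nat × Nat × Nat :=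
  let fc := if pvFence line then s.1 + 1 else s.1
  let b := if fc % 2 = 0 ∧ line = ['\n'] then s.2.2 + line.length else s.2.1
  (fc, b, s.2.2 + line.length)

def split_stable_markdown_py (buffer : String) : String × String :=
  let cs := buffer.toList
  if cs = [] then ("", "")
  else
    let st := (pvSplitLinesKeep cs []).foldl pvStepA (0, 0, 0)
    let fc := st.1
    let boundary := st.2.1
    if boundary > 0 then (String.ofList (cs.take boundary), String.ofList (cs.drop boundary))
    else if ¬ (PySem.Chars.isIn ['\n'] cs = true) then ("", buffer)
    else if PySem.Chars.endswith cs ['\n'] = true ∧ fc % 2 = 0 then ("", buffer)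
    else
      let i := PySem.Chars.rfind cs ['\n']
      (String.ofList (cs.take (i + 1).toNat), String.ofList (cs.drop (i + 1).toNat))

-- ===== PORT B =====
-- the reverse scan of Source B: (line, fence) pairs back-to-front, early exit at the first hit
def pvScanB (total : Nat) : List (List Char × Bool) → Nat → Nat → Nat
  | [], _, _ => 0
  | (l, f) :: rs, seen, off =>
    let seen' := seen + (if f then 1 else 0)
    if l = ['\n'] ∧ (total - seen') % 2 = 0 then off
    else pvScanB total rs seen' (off - l.length)

def split_stable_markdown_py_alt (buffer : String) : String × String :=
  let cs := buffer.toList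
  if cs = [] then ("", "")
  else
    let lines := pvSplitLinesKeep cs []
    let fences := lines.map pvFence
    let total := fences.count true
    let boundary := pvScanB total (lines.zip fences).reverse 0 cs.length
    let cut :=
      if boundary ≠ 0 then boundary
      else if ¬ (PySem.Chars.isIn ['\n'] cs = true) then 0
      else if PySem.Chars.endswith cs ['\n'] = true ∧ total % 2 = 0 then 0
      else (PySem.Chars.rfind cs ['\n'] + 1).toNat
    (String.ofList (cs.take cut), String.ofList (cs.drop cut))

-- ===== PRECONDITION & SPEC =====
def Spec_split_stable_markdown_py (buffer : String) (out : String × String) : Prop := out = split_stable_markdown_py_alt buffer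
instance (buffer : String) (out : String × String) : Decidable (Spec_split_stable_markdown_py buffer out) := by unfold Spec_split_stable_markdown_py; infer_instance

-- ===== CLAIM (what is proved, stated in full; the proofs are below) =====
def Claim_equal_split_stable_markdown_py : Prop := ∀ (buffer : String), Dom_split_stable_markdown_py buffer → Spec_split_stable_markdown_py buffer (split_stable_markdown_py buffer)

-- ===== LEMMAS AND PROOFS =====

def pvLenSum (ls : List (List Char)) : Nat := (ls.map List.length).sum

-- the boundary both scans compute, characterised from the front:
-- end offset of the last blank line committed outside a fence (0 if none)
def pvLastQual : List (List Char) → Nat → Nat → Nat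
  | [], _, _ => 0
  | l :: rs, fc, off =>
    let fc' := if pvFence l then fc + 1 else fc
    let r := pvLastQual rs fc' (off + l.length)
    if r ≠ 0 then r else if fc' % 2 = 0 ∧ l = ['\n'] then off + l.length else 0

theorem pv_mid_eq (r v b : Nat) (c : Prop) [Decidable c] (hv : c → v ≠ 0) :
    (if r = 0 then (if c then v else b) else r)
      = if (if r ≠ 0 then r else if c then v else 0) = 0 then b
        else (if r ≠ 0 then r else if c then v else 0) := by
  split_ifs <;> simp_all

theorem pv_foldA_eq (ls : List (List Char)) : ∀ (fc b off : Nat),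
    ls.foldl pvStepA (fc, b, off) =
      (fc + ls.countP pvFence,
       (if pvLastQual ls fc off = 0 then b else pvLastQual ls fc off),
       off + pvLenSum ls) := by
  induction ls with
  | nil => intro fc b off; simp [pvLastQual, pvLenSum]
  | cons l rs ih =>
    intro fc b off
    simp only [List.foldl_cons, pvStepA, pvLastQual, List.countP_cons, pvLenSum, List.map_cons,
      List.sum_cons]
    rw [ih]
    by_cases hf : pvFence l <;>
      simp only [hf, if_true, if_false, Bool.false_eq_true, Prod.mk.injEq] <;>
      refine ⟨by omega,
        pv_mid_eq _ _ _ _ (fun hc => by rcases hc with ⟨_, h2⟩; subst h2; simp),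
        by simp [pvLenSum]; omega⟩

theorem pv_fence_newline : pvFence ['\n'] = false := by decide

theorem pv_lastQual_append (xs : List (List Char)) (l : List Char) : ∀ (fc off : Nat),
    pvLastQual (xs ++ [l]) fc off =
      if (fc + xs.countP pvFence + (if pvFence l then 1 else 0)) % 2 = 0 ∧ l = ['\n']
      then off + pvLenSum xs + l.length
      else pvLastQual xs fc off := by
  induction xs with
  | nil =>
    intro fc off
    by_cases hf : pvFence l <;> simp [pvLastQual, pvLenSum, hf]
  | cons x xs ih =>
    intro fc off
    by_cases hl : l = ['\n']
    · subst hl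
      simp only [List.cons_append, pvLastQual, List.countP_cons, pv_fence_newline,
        Bool.false_eq_true, if_false, and_true, add_zero]
      rw [ih]
      simp only [pv_fence_newline, Bool.false_eq_true, if_false, and_true, add_zero]
      set fx := (if pvFence x then (1 : Nat) else 0) with hfx
      set fc' := (if pvFence x then fc + 1 else fc) with hfc'
      have hE : fc' = fc + fx := by by_cases h : pvFence x <;> simp [hfx, hfc', h]
      have hLen : pvLenSum (x :: xs) = x.length + pvLenSum xs := by simp [pvLenSum]
      by_cases hc : (fc' + xs.countP pvFence) % 2 = 0
      · rw [if_pos hc]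
        have h2 : (fc + (xs.countP pvFence + fx)) % 2 = 0 := by omega
        rw [if_pos h2]
        have h3 : off + x.length + pvLenSum xs + ['\n'].length ≠ 0 := by simp
        rw [if_pos h3, hLen]
        omega
      · rw [if_neg hc]
        have h2 : ¬ (fc + (xs.countP pvFence + fx)) % 2 = 0 := by omega
        rw [if_neg h2]
    · simp only [List.cons_append, pvLastQual, List.countP_cons]
      rw [ih]
      simp only [hl, and_false, if_false]

theorem pv_scanB_eq (ls : List (List Char)) (fc off : Nat) : ∀ (seen : Nat),
    pvScanB (fc + ls.countP pvFence + seen)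
      ((ls.map (fun l => (l, pvFence l))).reverse) seen (off + pvLenSum ls)
      = pvLastQual ls fc off := by
  induction ls using List.reverseRecOn with
  | nil => intro seen; simp [pvScanB, pvLastQual, pvLenSum]
  | append_singleton xs l ih =>
    intro seen
    rw [pv_lastQual_append]
    have hcnt : (xs ++ [l]).countP pvFence
        = xs.countP pvFence + (if pvFence l then 1 else 0) := by
      simp [List.countP_append, List.countP_cons]
    have hlen : pvLenSum (xs ++ [l]) = pvLenSum xs + l.length := by
      simp [pvLenSum]
    rw [hcnt, hlen]
    simp only [List.map_append, List.map_cons, List.map_nil, List.reverse_append,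
      List.reverse_cons, List.reverse_nil, List.nil_append, List.cons_append]
    rw [pvScanB]
    set fl := (if pvFence l then (1 : Nat) else 0) with hfl
    by_cases hl : l = ['\n']
    · subst hl
      have hfl0 : fl = 0 := by rw [hfl, pv_fence_newline]; rfl
      simp only [hfl0, add_zero]
      have hss : fc + xs.countP pvFence + seen - seen = fc + xs.countP pvFence := by omega
      rw [hss]
      have hoff : off + (pvLenSum xs + ['\n'].length) - ['\n'].length = off + pvLenSum xs := by
        omega
      rw [hoff]
      by_cases hc : (fc + xs.countP pvFence) % 2 = 0
      · rw [if_pos ⟨trivial, hc⟩, if_pos ⟨hc, trivial⟩]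
        omega
      · rw [if_neg (fun h => hc h.2), if_neg (fun h => hc h.1)]
        exact ih seen
    · rw [if_neg (fun h => hl h.1), if_neg (fun h => hl h.2)]
      have harg : fc + (xs.countP pvFence + fl) + seen
          = fc + xs.countP pvFence + (seen + fl) := by omega
      rw [harg]
      have hoff : off + (pvLenSum xs + l.length) - l.length = off + pvLenSum xs := by omega
      rw [hoff]
      exact ih (seen + fl)

theorem pv_lenSum_split : ∀ (cs acc : List Char),
    pvLenSum (pvSplitLinesKeep cs acc) = acc.length + cs.length := by
  intro cs acc
  fun_induction pvSplitLinesKeep cs acc <;> (try simp_all [pvLenSum]) <;> (try omega)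
  rename_i rest acc' hh ih
  have : rest ≠ [] := by intro h; rw [h] at hh; simp at hh
  have : 1 ≤ rest.length := by cases rest <;> simp_all
  omega

theorem pv_count_true_map (ls : List (List Char)) :
    (ls.map pvFence).count true = ls.countP pvFence := by
  induction ls with
  | nil => rfl
  | cons l rs ih =>
    simp only [List.map_cons, List.count_cons, List.countP_cons, ih]
    by_cases h : pvFence l <;> simp [h]

theorem pv_zip_map (ls : List (List Char)) :
    ls.zip (ls.map pvFence) = ls.map (fun l => (l, pvFence l)) := by
  induction ls with
  | nil => rfl
  | cons l rs ih => simp [ih]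

-- ===== VERDICT (by name: the statement is the Claim_ definition above) =====
theorem split_stable_markdown_py_spec : Claim_equal_split_stable_markdown_py := by
  intro buffer _
  unfold Spec_split_stable_markdown_py split_stable_markdown_py split_stable_markdown_py_alt
  by_cases h0 : buffer.toList = []
  · simp [h0]
  · simp only [h0, if_false]
    rw [pv_foldA_eq, pv_zip_map, pv_count_true_map]
    have hls : buffer.toList.length = 0 + pvLenSum (pvSplitLinesKeep buffer.toList []) := by
      rw [pv_lenSum_split]; simp
    have htot : (pvSplitLinesKeep buffer.toList []).countP pvFence
        = 0 + (pvSplitLinesKeep buffer.toList []).countP pvFence + 0 := by omega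
    rw [hls, htot, pv_scanB_eq]
    set q := pvLastQual (pvSplitLinesKeep buffer.toList []) 0 0 with hq
    have hcollapse : (if q = 0 then 0 else q) = q := by by_cases h : q = 0 <;> simp [h]
    simp only [hcollapse]
    by_cases hb : q = 0
    · simp only [hb, if_neg (by omega : ¬ (0 : Nat) > 0), ne_eq, not_true_eq_false, if_false]
      by_cases hin : PySem.Chars.isIn ['\n'] buffer.toList = true
      · simp only [hin, not_true_eq_false, if_false]
        by_cases he : PySem.Chars.endswith buffer.toList ['\n'] = true ∧
            (0 + (pvSplitLinesKeep buffer.toList []).countP pvFence + 0) % 2 = 0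
        · have heA : PySem.Chars.endswith buffer.toList ['\n'] = true ∧
              (0 + (0 + (pvSplitLinesKeep buffer.toList []).countP pvFence + 0)) % 2 = 0 :=
            ⟨he.1, by have := he.2; omega⟩
          rw [if_pos heA, if_pos he]
          simp [String.ofList_toList]
        · have heA : ¬ (PySem.Chars.endswith buffer.toList ['\n'] = true ∧
              (0 + (0 + (pvSplitLinesKeep buffer.toList []).countP pvFence + 0)) % 2 = 0) :=
            fun h => he ⟨h.1, by have := h.2; omega⟩
          rw [if_neg heA, if_neg he]
      · simp [hin, String.ofList_toList]
    · have hgt : q > 0 := by omega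
      simp [hgt, hb]
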